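-- pv_equiv track=rewrite | github.com/LamarckLab/022_PythonTip_Exercises | 095.py | missing_numbers_info
-- ===== SOURCE A (Python) =====
-- def missing_numbers_info(num_list):
--     # 此处写下你的代码
--     sorted_list = sorted(num_list)
--     start, end = sorted_list[0], sorted_list[-1]
--     output_list = [0,0]
--     for num in range(start, end+1):
--         if num not in num_list:
--             output_list[0] += 1
--             output_list[1] += num
--     return tuple(output_list)
-- ===== SOURCE B (Python) =====
-- def missing_numbers_info(num_list):
--     distinct = set(num_list)
--     lo = min(distinct)
--     hi = max(distinct)
--     n = hi - lo + 1
--     return (n - len(distinct), (lo + hi) * n // 2 - sum(distinct))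
-- ===== Notes on version B (the rewrite author's own statement) =====
-- stated objective: faster
-- what changed: Replaces the scan of every integer in [min,max] with an O(n) membership test each by a set plus the arithmetic-series formula: count = range size - |set|, sum = Gauss sum - sum(set).
import Mathlib
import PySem

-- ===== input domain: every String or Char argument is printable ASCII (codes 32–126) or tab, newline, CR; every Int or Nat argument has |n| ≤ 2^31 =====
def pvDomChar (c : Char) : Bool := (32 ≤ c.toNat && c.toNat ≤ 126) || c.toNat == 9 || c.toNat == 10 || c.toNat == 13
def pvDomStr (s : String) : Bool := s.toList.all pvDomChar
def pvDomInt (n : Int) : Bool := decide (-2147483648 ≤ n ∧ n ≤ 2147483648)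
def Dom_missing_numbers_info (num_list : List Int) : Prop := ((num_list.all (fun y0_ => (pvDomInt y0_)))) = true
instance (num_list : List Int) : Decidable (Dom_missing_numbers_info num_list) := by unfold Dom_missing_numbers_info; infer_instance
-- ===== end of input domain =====

-- B replaces A's scan of every integer in [min,max] (O(n) membership each) by a set
-- plus the arithmetic-series formula (objective: faster; measured).


-- ===== PORT A =====
def missing_numbers_info (num_list : List Int) : List Int :=
  let sorted_list := PySem.List.sorted num_list (fun x => x) false
  match PySem.List.pyGet? sorted_list 0, PySem.List.pyGet? sorted_list (-1) with
  | some start, some stop =>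
    let out := (PySem.List.pyRange start (stop + 1) 1).foldl
      (fun (acc : Int × Int) num =>
        if num ∈ num_list then acc else (acc.1 + 1, acc.2 + num)) (0, 0)
    [out.1, out.2]
  | _, _ => []   -- IndexError on the empty list; excluded by Pre_

-- ===== PORT B =====
def missing_numbers_info_alt (num_list : List Int) : List Int :=
  let distinct := PySem.Set.ofList num_list
  match PySem.List.min? distinct (fun x => x) with
  | none => []   -- ValueError on the empty list; excluded by Pre_
  | some lo =>
    match PySem.List.max? distinct (fun x => x) with
    | none => []
    | some hi =>
      let n := hi - lo + 1
      [n - (distinct.length : Int),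
       PySem.Int.floordiv ((lo + hi) * n) 2 - distinct.sum]

-- ===== PRECONDITION & SPEC =====
-- A raises IndexError on the empty list (sorted_list[0]); B raises ValueError there too.
def Pre_missing_numbers_info (num_list : List Int) : Prop := num_list ≠ []
instance (num_list : List Int) : Decidable (Pre_missing_numbers_info num_list) := by unfold Pre_missing_numbers_info; infer_instance
def pvWitness_missing_numbers_info : List Int := [3, 1, 7]

def Spec_missing_numbers_info (num_list : List Int) (out : List Int) : Prop := out = missing_numbers_info_alt num_list
instance (num_list : List Int) (out : List Int) : Decidable (Spec_missing_numbers_info num_list out) := by unfold Spec_missing_numbers_info; infer_instance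

-- ===== CLAIM (what is proved, stated in full; the proofs are below) =====
def Claim_equal_missing_numbers_info : Prop := ∀ (num_list : List Int), Dom_missing_numbers_info num_list → Pre_missing_numbers_info num_list → Spec_missing_numbers_info num_list (missing_numbers_info num_list)

-- ===== LEMMAS AND PROOFS =====

-- the last element of a (≤)-sorted list bounds every element
theorem pv_last_ge_of_pairwise {t : List Int} (hp : t.Pairwise (· ≤ ·)) {m : Int}
    (hm : t.getLast? = some m) : ∀ y ∈ t, y ≤ m := by
  induction t with
  | nil => simp at hm
  | cons a t ih =>
    cases t with
    | nil => simp_all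
    | cons b t' =>
      rw [List.getLast?_cons_cons] at hm
      obtain ⟨hha, hp'⟩ := List.pairwise_cons.mp hp
      intro y hy
      rcases List.mem_cons.mp hy with rfl | hy'
      · exact hha m (List.mem_of_getLast? hm)
      · exact ih hp' hm y hy'

-- A's loop computes (count, sum) of the range elements missing from l
theorem pv_foldA (R : List Int) (l : List Int) (a b : Int) :
    R.foldl (fun (acc : Int × Int) num =>
        if num ∈ l then acc else (acc.1 + 1, acc.2 + num)) (a, b)
      = (a + ((R.filter (fun x => decide (x ∉ l))).length : Int),
         b + (R.filter (fun x => decide (x ∉ l))).sum) := by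
  induction R generalizing a b with
  | nil => simp
  | cons x R ih =>
    by_cases hx : x ∈ l
    · simp [hx, ih]
    · simp [hx, ih (a+1) (b+x)]
      constructor <;> ring

-- Gauss: twice the sum of pyRange lo (lo+n) 1
theorem pv_sum_pyRange (lo : Int) (n : Nat) :
    2 * (PySem.List.pyRange lo (lo + (n : Int)) 1).sum = (n : Int) * (2 * lo + (n : Int) - 1) := by
  induction n with
  | zero => simp [PySem.List.pyRange_one_eq_nil]
  | succ k ih =>
    have h : PySem.List.pyRange lo (lo + (k : Int) + 1) 1
        = PySem.List.pyRange lo (lo + (k : Int)) 1 ++ [lo + (k : Int)] :=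
      PySem.List.pyRange_one_succ_right (by omega)
    have hcast : lo + ((k + 1 : Nat) : Int) = lo + (k : Int) + 1 := by push_cast; ring
    rw [hcast, h, List.sum_append, List.sum_singleton]
    push_cast
    push_cast at ih
    linear_combination ih

theorem missing_numbers_info_spec_aux (l : List Int) (hne : l ≠ []) :
    missing_numbers_info l = missing_numbers_info_alt l := by
  -- B side: name lo, hi
  set S := PySem.Set.ofList l with hS
  have hSmem : ∀ x, x ∈ S ↔ x ∈ l := by
    intro x; rw [hS]; exact PySem.Set.mem_ofList l x
  have hSnd : S.Nodup := by rw [hS]; exact PySem.Set.nodup_ofList l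
  have hSne : S ≠ [] := by
    intro h
    have hm : l.head hne ∈ S := (hSmem _).mpr (List.head_mem hne)
    rw [h] at hm
    simp at hm
  obtain ⟨lo, hlo⟩ : ∃ lo, PySem.List.min? S (fun x => x) = some lo := by
    cases h : PySem.List.min? S (fun x => x) with
    | none => exact absurd ((PySem.List.min?_eq_none_iff S _).mp h) hSne
    | some m => exact ⟨m, rfl⟩
  obtain ⟨hi, hhi⟩ : ∃ hi, PySem.List.max? S (fun x => x) = some hi := by
    cases h : PySem.List.max? S (fun x => x) with
    | none => exact absurd ((PySem.List.max?_eq_none_iff S _).mp h) hSne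
    | some m => exact ⟨m, rfl⟩
  have hlo_mem : lo ∈ l := (hSmem lo).mp (PySem.List.min?_mem hlo)
  have hhi_mem : hi ∈ l := (hSmem hi).mp (PySem.List.max?_mem hhi)
  have hlo_min : ∀ y ∈ l, lo ≤ y := fun y hy => PySem.List.min?_isMin hlo y ((hSmem y).mpr hy)
  have hhi_max : ∀ y ∈ l, y ≤ hi := fun y hy => PySem.List.max?_isMax hhi y ((hSmem y).mpr hy)
  have hlohi : lo ≤ hi := hlo_min hi hhi_mem
  -- A side: sorted head = lo, sorted last = hi
  set t := PySem.List.sorted l (fun x => x) false with ht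
  have htperm : t.Perm l := by rw [ht]; exact PySem.List.sorted_perm l _ false
  have htne : t ≠ [] := by
    intro h
    rw [h] at htperm
    exact hne (htperm.symm.eq_nil)
  obtain ⟨m, t', hcons⟩ := List.exists_cons_of_ne_nil htne
  have hhead : PySem.List.pyGet? t 0 = some m := by
    rw [hcons]; exact PySem.List.pyGet?_zero_cons m t'
  have hsorted_eq : PySem.List.sorted l (fun x => x) false = m :: t' := by
    rw [← ht]; exact hcons
  have hm_eq : m = lo := by
    have hm_mem : m ∈ l := htperm.mem_iff.mp (hcons ▸ List.mem_cons_self)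
    have h1 : m ≤ lo := PySem.List.key_head_sorted_le l (fun x => x) hsorted_eq lo hlo_mem
    have h2 : lo ≤ m := hlo_min m hm_mem
    omega
  obtain ⟨M, hM⟩ : ∃ M, t.getLast? = some M := by
    cases h : t.getLast? with
    | none => exact absurd (List.getLast?_eq_none_iff.mp h) htne
    | some M => exact ⟨M, rfl⟩
  have hlast : PySem.List.pyGet? t (-1) = some M := by
    rw [PySem.List.pyGet?_neg_one]; exact hM
  have hM_eq : M = hi := by
    have hM_mem : M ∈ l := htperm.mem_iff.mp (List.mem_of_getLast? hM)
    have hpw : t.Pairwise (· ≤ ·) := by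
      rw [ht]; exact PySem.List.sorted_pairwise l (fun x => x)
    have h1 : hi ≤ M := pv_last_ge_of_pairwise hpw hM hi (htperm.mem_iff.mpr hhi_mem)
    have h2 : M ≤ hi := hhi_max M hM_mem
    omega
  -- evaluate both ports
  set R := PySem.List.pyRange lo (hi + 1) 1 with hR
  have hAval : missing_numbers_info l =
      [(0 : Int) + ((R.filter (fun x => decide (x ∉ l))).length : Int),
       (0 : Int) + (R.filter (fun x => decide (x ∉ l))).sum] := by
    unfold missing_numbers_info
    rw [← ht]
    simp only [hhead, hlast, hm_eq, hM_eq, ← hR, pv_foldA]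
  have hBval : missing_numbers_info_alt l =
      [hi - lo + 1 - (S.length : Int),
       PySem.Int.floordiv ((lo + hi) * (hi - lo + 1)) 2 - S.sum] := by
    unfold missing_numbers_info_alt
    rw [← hS]
    simp only [hlo, hhi]
  rw [hAval, hBval]
  -- the present elements of R are exactly S, up to permutation
  have hRnd : R.Nodup := by rw [hR]; exact PySem.List.nodup_pyRange_one lo (hi + 1)
  have hRin : ∀ x, x ∈ R ↔ lo ≤ x ∧ x < hi + 1 := by
    intro x; rw [hR]; exact PySem.List.mem_pyRange_one
  have hpermIn : (R.filter (fun x => decide (x ∈ l))).Perm S := by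
    rw [List.perm_ext_iff_of_nodup (hRnd.filter _) hSnd]
    intro x
    simp only [List.mem_filter, hSmem, decide_eq_true_eq, hRin]
    constructor
    · exact fun h => h.2
    · exact fun h => ⟨⟨hlo_min x h, by have := hhi_max x h; omega⟩, h⟩
  have hlen_in : (R.filter (fun x => decide (x ∈ l))).length = S.length := hpermIn.length_eq
  have hsum_in : (R.filter (fun x => decide (x ∈ l))).sum = S.sum := hpermIn.sum_eq
  -- partition of R by membership
  have hpart : (R.filter (fun x => decide (x ∈ l)) ++ R.filter (fun x => decide (x ∉ l))).Perm R := by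
    have h := List.filter_append_perm (fun x => decide (x ∈ l)) R
    simpa using h
  have hlenR : (R.filter (fun x => decide (x ∈ l))).length
      + (R.filter (fun x => decide (x ∉ l))).length = R.length := by
    have h := hpart.length_eq
    simpa [List.length_append] using h
  have hsumR : (R.filter (fun x => decide (x ∈ l))).sum
      + (R.filter (fun x => decide (x ∉ l))).sum = R.sum := by
    have h := hpart.sum_eq
    simpa [List.sum_append] using h
  -- R's length and sum in closed form
  have hRlen : (R.length : Int) = hi - lo + 1 := by
    rw [hR, PySem.List.length_pyRange_one]; omega
  have hRsum : R.sum = PySem.Int.floordiv ((lo + hi) * (hi - lo + 1)) 2 := by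
    have hn : hi + 1 = lo + (((hi + 1 - lo).toNat : Nat) : Int) := by omega
    have h2 : 2 * R.sum = (lo + hi) * (hi - lo + 1) := by
      rw [hR, hn, pv_sum_pyRange lo (hi + 1 - lo).toNat]
      have hc : (((hi + 1 - lo).toNat : Nat) : Int) = hi + 1 - lo := by omega
      rw [hc]; ring
    rw [PySem.Int.floordiv_eq_ediv_of_pos (by omega), ← h2]
    omega
  -- finish
  have e1 : ((R.filter (fun x => decide (x ∉ l))).length : Int)
      = hi - lo + 1 - (S.length : Int) := by
    rw [hlen_in] at hlenR
    omega
  have e2 : (R.filter (fun x => decide (x ∉ l))).sum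
      = PySem.Int.floordiv ((lo + hi) * (hi - lo + 1)) 2 - S.sum := by
    rw [hsum_in, hRsum] at hsumR
    linarith
  rw [e1, e2]
  simp

-- ===== VERDICT (by name: the statement is the Claim_ definition above) =====
theorem missing_numbers_info_spec : Claim_equal_missing_numbers_info := by
  intro l _ hpre
  unfold Spec_missing_numbers_info
  exact missing_numbers_info_spec_aux l hpre
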